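-- pv_equiv track=rewrite | github.com/Fiiranek/WDI | set_2/z_14.py | validate_mask
-- ===== SOURCE A (Python) =====
-- def validate_mask(a: int, b: int, mask: int):
--     counter_a = len(str(a))
--     counter_b = len(str(b))
--     while mask > 0:
--         if mask % 2 == 0:
--             counter_a -= 1
--         else:
--             counter_b -= 1
--         mask //= 2
--     return counter_a >= 0 and counter_b == 0
-- ===== SOURCE B (Python) =====
-- def validate_mask(a: int, b: int, mask: int):
--     if mask > 0:
--         ones = mask.bit_count()
--         zeros = mask.bit_length() - ones
--     else:
--         ones = 0
--         zeros = 0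
--     return len(str(a)) >= zeros and len(str(b)) == ones
-- ===== Notes on version B (the rewrite author's own statement) =====
-- stated objective: idiomatic
-- what changed: Replaces the per-bit while-loop and mutable counters with closed-form bit statistics (bit_count/bit_length) guarded for non-positive masks, then a direct comparison against the digit-string lengths.
import Mathlib
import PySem

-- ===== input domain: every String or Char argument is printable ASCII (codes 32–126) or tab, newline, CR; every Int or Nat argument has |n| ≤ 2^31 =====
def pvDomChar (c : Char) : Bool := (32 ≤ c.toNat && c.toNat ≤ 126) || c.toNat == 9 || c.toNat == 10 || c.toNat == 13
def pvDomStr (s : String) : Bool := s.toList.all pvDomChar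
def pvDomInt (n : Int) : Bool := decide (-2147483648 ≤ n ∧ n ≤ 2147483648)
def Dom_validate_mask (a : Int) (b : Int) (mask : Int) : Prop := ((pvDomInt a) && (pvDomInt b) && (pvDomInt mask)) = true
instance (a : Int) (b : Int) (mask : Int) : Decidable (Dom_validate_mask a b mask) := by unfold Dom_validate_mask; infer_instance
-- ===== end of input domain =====

-- B replaces A's per-bit while-loop with closed-form bit_count/bit_length statistics (idiomatic; same result).

-- ===== PORT A =====
-- the while-loop of A, state (counter_a, counter_b)
def vmLoop (mask ca cb : Int) : Int × Int :=
  if h : mask > 0 then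
    if PySem.Int.mod mask 2 = 0 then
      vmLoop (PySem.Int.floordiv mask 2) (ca - 1) cb
    else
      vmLoop (PySem.Int.floordiv mask 2) ca (cb - 1)
  else (ca, cb)
termination_by mask.toNat
decreasing_by
  all_goals
    rw [PySem.Int.floordiv_eq_ediv_of_pos (by omega)]
    omega

def validate_mask (a : Int) (b : Int) (mask : Int) : Bool :=
  let counter_a := PySem.Str.len (PySem.Int.toStr a)
  let counter_b := PySem.Str.len (PySem.Int.toStr b)
  let p := vmLoop mask counter_a counter_b
  decide (p.1 ≥ 0 ∧ p.2 = 0)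

-- ===== PORT B =====
def validate_mask_alt (a : Int) (b : Int) (mask : Int) : Bool :=
  let ones : Int := if mask > 0 then (PySem.Int.bitCount mask : Int) else 0
  let zeros : Int := if mask > 0 then (PySem.Int.bitLength mask : Int) - (PySem.Int.bitCount mask : Int) else 0
  decide (PySem.Str.len (PySem.Int.toStr a) ≥ zeros ∧ PySem.Str.len (PySem.Int.toStr b) = ones)

-- ===== PRECONDITION & SPEC =====
def Spec_validate_mask (a : Int) (b : Int) (mask : Int) (out : Bool) : Prop := out = validate_mask_alt a b mask
instance (a : Int) (b : Int) (mask : Int) (out : Bool) : Decidable (Spec_validate_mask a b mask out) := by unfold Spec_validate_mask; infer_instance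

-- ===== CLAIM =====
def Claim_equal_validate_mask : Prop := ∀ (a : Int) (b : Int) (mask : Int), Dom_validate_mask a b mask → Spec_validate_mask a b mask (validate_mask a b mask)

-- ===== LEMMAS AND PROOFS =====
theorem vmLoop_eq (mask ca cb : Int) :
    vmLoop mask ca cb =
      (ca - (if mask > 0 then (PySem.Int.bitLength mask : Int) - (PySem.Int.bitCount mask : Int) else 0),
       cb - (if mask > 0 then (PySem.Int.bitCount mask : Int) else 0)) := by
  induction mask, ca, cb using vmLoop.induct with
  | case1 mask ca cb h hm ih =>
    rw [vmLoop, dif_pos h, if_pos hm, ih]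
    have hd : PySem.Int.floordiv mask 2 = mask / 2 := PySem.Int.floordiv_eq_ediv_of_pos (by omega)
    have hbl := PySem.Int.bitLength_of_pos (n := mask) (by omega)
    have hbc := PySem.Int.bitCount_of_pos (n := mask) (by omega)
    rw [hd] at hbl hbc ⊢
    have hm0 : (PySem.Int.mod mask 2).toNat = 0 := by rw [hm]; rfl
    rw [hm0] at hbc
    have hle := PySem.Int.bitCount_le_bitLength (mask / 2)
    by_cases hm2 : mask / 2 > (0 : Int)
    · simp only [if_pos h, if_pos hm2, Prod.mk.injEq]
      omega
    · have hz : mask / 2 = (0 : Int) := by omega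
      rw [hz] at hbl hbc ⊢
      simp only [if_pos h, PySem.Int.bitLength_zero, PySem.Int.bitCount_zero,
        Prod.mk.injEq] at *
      omega
  | case2 mask ca cb h hm ih =>
    rw [vmLoop, dif_pos h, if_neg hm, ih]
    have hd : PySem.Int.floordiv mask 2 = mask / 2 := PySem.Int.floordiv_eq_ediv_of_pos (by omega)
    have hbl := PySem.Int.bitLength_of_pos (n := mask) (by omega)
    have hbc := PySem.Int.bitCount_of_pos (n := mask) (by omega)
    rw [hd] at hbl hbc ⊢
    have hmod : PySem.Int.mod mask 2 = 1 := by
      rw [PySem.Int.mod_eq_emod_of_pos (by omega)] at hm ⊢; omega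
    have hm1 : (PySem.Int.mod mask 2).toNat = 1 := by rw [hmod]; rfl
    rw [hm1] at hbc
    have hle := PySem.Int.bitCount_le_bitLength (mask / 2)
    by_cases hm2 : mask / 2 > (0 : Int)
    · simp only [if_pos h, if_pos hm2, Prod.mk.injEq]
      omega
    · have hz : mask / 2 = (0 : Int) := by omega
      rw [hz] at hbl hbc ⊢
      simp only [if_pos h, PySem.Int.bitLength_zero, PySem.Int.bitCount_zero,
        Prod.mk.injEq] at *
      omega
  | case3 mask ca cb h =>
    rw [vmLoop, dif_neg h]
    simp [if_neg h]

-- ===== VERDICT =====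
theorem validate_mask_spec : Claim_equal_validate_mask := by
  intro a b mask _
  unfold Spec_validate_mask validate_mask validate_mask_alt
  dsimp only
  rw [vmLoop_eq]
  simp only [decide_eq_decide]
  constructor <;> rintro ⟨h1, h2⟩ <;> constructor <;> omega
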